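-- pv_equiv track=rewrite | github.com/Catoverflow/WebSearch | bool_search.py | strip
-- ===== SOURCE A (Python) =====
-- def strip(iia, iib):
--     # handle circumstances in which one or more word is not found
--     if iia == None:
--         return None
--     elif iib == None:
--         return iia
--     i = 0
--     j = 0
--     res = iia
--     while i < len(res) and j < len(iib):
--         if res[i] > iib[j]:
--             j += 1
--         elif res[i] < iib[j]:
--             i += 1
--         else:
--             res.pop(i)
--             j += 1
--     return res
-- ===== SOURCE B (Python) =====
-- def strip(iia, iib):
--     # For-loop over iib with an inner scan pointer into iia: for each b we
--     # emit the elements of iia below b, then drop one element equal to b.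
--     # Builds a fresh list; does NOT mutate iia (A pops from it in place).
--     if iia == None:
--         return None
--     elif iib == None:
--         return iia
--     out = []
--     start = 0
--     n = len(iia)
--     for b in iib:
--         while start < n and iia[start] < b:
--             out.append(iia[start])
--             start += 1
--         if start < n and iia[start] == b:
--             start += 1
--     return out + iia[start:]
-- ===== Notes on version B (the rewrite author's own statement) =====
-- stated objective: alternative
-- what changed: Replaces A's single while-loop that deletes matched elements with res.pop(i) by a for-loop over iib with an inner scan pointer into the untouched iia, appending kept elements to a fresh output list and concatenating the remaining tail; B does not mutate iia.
import Mathlib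
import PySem

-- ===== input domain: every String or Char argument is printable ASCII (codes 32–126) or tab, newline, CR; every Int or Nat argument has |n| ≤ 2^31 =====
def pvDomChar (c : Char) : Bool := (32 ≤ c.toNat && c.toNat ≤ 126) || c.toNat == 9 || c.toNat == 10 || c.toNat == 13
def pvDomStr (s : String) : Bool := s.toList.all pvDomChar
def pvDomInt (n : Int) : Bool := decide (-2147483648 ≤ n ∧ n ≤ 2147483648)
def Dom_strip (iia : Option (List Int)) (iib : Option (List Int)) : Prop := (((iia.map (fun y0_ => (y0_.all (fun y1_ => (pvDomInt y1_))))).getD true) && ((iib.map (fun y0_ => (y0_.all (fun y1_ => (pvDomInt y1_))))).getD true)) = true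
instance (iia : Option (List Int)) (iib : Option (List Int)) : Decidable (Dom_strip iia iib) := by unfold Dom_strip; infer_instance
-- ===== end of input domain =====

-- B replaces A's pop(i)-while-loop by a for-loop over iib with an inner scan pointer
-- into iia, building a fresh output list (alternative structure); same return value.
-- NOTE: Python A mutates iia in place (pop); B does not — the claim is about the return value only.

-- ===== PORT A =====
-- A's while loop: state (res, i, j); res[i] and iib[j] are in range under the guard,
-- res.pop(i) is List.eraseIdx i (exact for 0 ≤ i < len). 'fuel' only bounds the
-- iteration count for totality; len(res)+len(iib) iterations always suffice
-- (each step increases i or j or shrinks res), so the loop never exits on fuel.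
def stripLoop (fuel : Nat) (res : List Int) (iib : List Int) (i j : Nat) : List Int :=
  match fuel with
  | 0 => res
  | fuel + 1 =>
    if h : i < res.length ∧ j < iib.length then
      if res[i] > iib[j] then stripLoop fuel res iib i (j + 1)
      else if res[i] < iib[j] then stripLoop fuel res iib (i + 1) j
      else stripLoop fuel (res.eraseIdx i) iib i (j + 1)
    else res

def strip (iia : Option (List Int)) (iib : Option (List Int)) : Option (List Int) :=
  match iia with
  | none => none
  | some a =>
    match iib with
    | none => some a
    | some b => some (stripLoop (a.length + b.length) a b 0 0)

-- ===== PORT B =====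
-- Source B's inner 'while start < n and iia[start] < b' loop: appends the scanned
-- element to out and advances start (terminates because iia.length - start drops).
def innerB (iia : List Int) (b : Int) (out : List Int) (start : Nat) : List Int × Nat :=
  if h : start < iia.length then
    if iia[start]'h < b then innerB iia b (out ++ [iia[start]'h]) (start + 1)
    else (out, start)
  else (out, start)
termination_by iia.length - start
decreasing_by omega

-- Source B's body of 'for b in iib': the inner while, then the one-match skip.
def stepB (iia : List Int) (s : List Int × Nat) (b : Int) : List Int × Nat :=
  let r := innerB iia b s.1 s.2
  if h : r.2 < iia.length then
    if iia[r.2]'h = b then (r.1, r.2 + 1) else r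
  else r

def strip_alt (iia : Option (List Int)) (iib : Option (List Int)) : Option (List Int) :=
  match iia with
  | none => none
  | some a =>
    match iib with
    | none => some a
    | some b =>
      let s := b.foldl (stepB a) ([], 0)
      some (s.1 ++ a.drop s.2)   -- 'return out + iia[start:]'

-- ===== PRECONDITION & SPEC =====
def Spec_strip (iia : Option (List Int)) (iib : Option (List Int)) (out : Option (List Int)) : Prop := out = strip_alt iia iib
instance (iia : Option (List Int)) (iib : Option (List Int)) (out : Option (List Int)) : Decidable (Spec_strip iia iib out) := by unfold Spec_strip; infer_instance

-- ===== CLAIM =====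
def Claim_equal_strip : Prop := ∀ (iia : Option (List Int)) (iib : Option (List Int)), Dom_strip iia iib → Spec_strip iia iib (strip iia iib)

-- ===== LEMMAS AND PROOFS =====

-- reference function both programs compute (relative to the consumed prefixes)
def pvDiff : List Int → List Int → List Int
  | xs, [] => xs
  | [], _ :: _ => []
  | a :: xs, b :: ys =>
    if a > b then pvDiff (a :: xs) ys
    else if a < b then a :: pvDiff xs (b :: ys)
    else pvDiff xs ys

lemma pvDiff_nil_left (ys : List Int) : pvDiff [] ys = [] := by
  cases ys <;> simp [pvDiff]

lemma pvDiff_nil_right (xs : List Int) : pvDiff xs [] = xs := by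
  cases xs <;> simp [pvDiff]

lemma eraseIdx_append_cons (out : List Int) (a : Int) (xs : List Int) :
    (out ++ a :: xs).eraseIdx out.length = out ++ xs := by
  induction out with
  | nil => simp
  | cons c cs ih => simp [ih]

lemma getElem_append_len (out : List Int) (a : Int) (xs : List Int)
    (h : out.length < (out ++ a :: xs).length) : (out ++ a :: xs)[out.length] = a := by
  rw [List.getElem_append_right (Nat.le_refl _)]
  simp

lemma stripLoop_eq (iib : List Int) :
    ∀ (n : Nat) (out tail : List Int) (j : Nat),
      tail.length + (iib.length - j) ≤ n →
      stripLoop n (out ++ tail) iib out.length j = out ++ pvDiff tail (iib.drop j) := by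
  intro n
  induction n with
  | zero =>
    intro out tail j hn
    have htail : tail = [] := by cases tail <;> simp_all
    subst htail
    show out ++ ([] : List Int) = _
    cases hd : iib.drop j with
    | nil => simp [pvDiff]
    | cons b ys => simp [pvDiff]
  | succ n ih =>
    intro out tail j hn
    show (if h : out.length < (out ++ tail).length ∧ j < iib.length then _ else _) = _
    by_cases hguard : out.length < (out ++ tail).length ∧ j < iib.length
    · obtain ⟨h1, h2⟩ := hguard
      cases tail with
      | nil => simp at h1
      | cons a xs =>
        have hdrop : iib.drop j = iib[j] :: iib.drop (j + 1) :=
          List.drop_eq_getElem_cons h2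
        have hget : (out ++ a :: xs)[out.length]'h1 = a := getElem_append_len out a xs h1
        rw [dif_pos ⟨h1, h2⟩]
        simp only [hget]
        by_cases hgt : a > iib[j]
        · rw [if_pos hgt, ih out (a :: xs) (j + 1) (by simp at hn ⊢; omega), hdrop]
          simp only [pvDiff]
          rw [if_pos hgt]
        · rw [if_neg hgt]
          by_cases hlt : a < iib[j]
          · rw [if_pos hlt]
            have hlen : out.length + 1 = (out ++ [a]).length := by simp
            have hre : out ++ a :: xs = (out ++ [a]) ++ xs := by simp
            rw [hlen, hre, ih (out ++ [a]) xs j (by simp at hn ⊢; omega), hdrop]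
            simp only [pvDiff]
            rw [if_neg hgt, if_pos hlt]
            simp
          · rw [if_neg hlt, eraseIdx_append_cons,
              ih out xs (j + 1) (by simp at hn ⊢; omega), hdrop]
            simp only [pvDiff]
            rw [if_neg hgt, if_neg hlt]
    · rw [dif_neg hguard]
      simp only [not_and, not_lt] at hguard
      by_cases htail : tail = []
      · subst htail
        cases hd : iib.drop j with
        | nil => simp [pvDiff]
        | cons b ys => simp [pvDiff]
      · have h1 : out.length < (out ++ tail).length := by
          simp; exact List.length_pos_of_ne_nil htail
        have h2 : iib.length ≤ j := hguard h1
        rw [List.drop_eq_nil_of_le h2]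
        cases tail with
        | nil => simp [pvDiff]
        | cons a xs => simp [pvDiff]

-- innerB preserves out ++ pvDiff (drop start) (b::ys) and stops at an element ≥ b (or the end)
lemma innerB_spec (iia : List Int) (b : Int) (ys : List Int) :
    ∀ (k : Nat) (out : List Int) (start : Nat), iia.length - start ≤ k →
      ((innerB iia b out start).1 ++ pvDiff (iia.drop (innerB iia b out start).2) (b :: ys)
        = out ++ pvDiff (iia.drop start) (b :: ys))
      ∧ (∀ h : (innerB iia b out start).2 < iia.length,
          ¬ iia[(innerB iia b out start).2]'h < b) := by
  intro k
  induction k with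
  | zero =>
    intro out start hk
    rw [innerB, dif_neg (by omega)]
    exact ⟨rfl, fun h => absurd h (by omega)⟩
  | succ k ih =>
    intro out start hk
    rw [innerB]
    by_cases h1 : start < iia.length
    · rw [dif_pos h1]
      by_cases h2 : iia[start]'h1 < b
      · rw [if_pos h2]
        have hdrop : iia.drop start = iia[start] :: iia.drop (start + 1) :=
          List.drop_eq_getElem_cons h1
        have := ih (out ++ [iia[start]'h1]) (start + 1) (by omega)
        refine ⟨?_, this.2⟩
        rw [this.1, hdrop]
        simp only [pvDiff]
        rw [if_neg (by omega), if_pos h2]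
        simp
      · rw [if_neg h2]
        exact ⟨rfl, fun h hlt => h2 hlt⟩
    · rw [dif_neg h1]
      exact ⟨rfl, fun h => absurd h h1⟩

lemma stepB_spec (iia : List Int) (b : Int) (ys : List Int) (out : List Int) (start : Nat) :
    (stepB iia (out, start) b).1 ++ pvDiff (iia.drop (stepB iia (out, start) b).2) ys
      = out ++ pvDiff (iia.drop start) (b :: ys) := by
  have hspec := innerB_spec iia b ys (iia.length - start) out start (le_refl _)
  obtain ⟨heq, hpost⟩ := hspec
  simp only [stepB]
  by_cases hst : (innerB iia b out start).2 < iia.length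
  · have hnlt : ¬ iia[(innerB iia b out start).2]'hst < b := hpost hst
    have hdrop : iia.drop (innerB iia b out start).2
        = iia[(innerB iia b out start).2] :: iia.drop ((innerB iia b out start).2 + 1) :=
      List.drop_eq_getElem_cons hst
    rw [dif_pos hst]
    by_cases heqb : iia[(innerB iia b out start).2]'hst = b
    · rw [if_pos heqb, ← heq, hdrop]
      simp only [pvDiff]
      rw [if_neg (by omega), if_neg (by omega)]
    · rw [if_neg heqb, ← heq, hdrop]
      have hgt : iia[(innerB iia b out start).2]'hst > b := by omega
      simp only [pvDiff]
      rw [if_pos hgt]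
  · rw [dif_neg hst]
    have hd : iia.drop (innerB iia b out start).2 = [] := List.drop_eq_nil_of_le (by omega)
    rw [← heq, hd, pvDiff_nil_left, pvDiff_nil_left]

lemma foldB_eq (iia : List Int) :
    ∀ (ys : List Int) (out : List Int) (start : Nat),
      (ys.foldl (stepB iia) (out, start)).1 ++ iia.drop (ys.foldl (stepB iia) (out, start)).2
        = out ++ pvDiff (iia.drop start) ys := by
  intro ys
  induction ys with
  | nil => intro out start; simp [pvDiff_nil_right]
  | cons b ys ih =>
    intro out start
    simp only [List.foldl_cons]
    rcases hS : stepB iia (out, start) b with ⟨o1, st1⟩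
    have := stepB_spec iia b ys out start
    rw [hS] at this
    simp only at this
    rw [ih o1 st1, this]

lemma loops_agree (a b : List Int) :
    stripLoop (a.length + b.length) a b 0 0
      = (b.foldl (stepB a) ([], 0)).1 ++ a.drop (b.foldl (stepB a) ([], 0)).2 := by
  have hA := stripLoop_eq b (a.length + b.length) [] a 0 (by omega)
  have hB := foldB_eq a b [] 0
  simpa using hA.trans (by simpa using hB.symm)

-- ===== VERDICT =====
theorem strip_spec : Claim_equal_strip := by
  intro iia iib _
  unfold Spec_strip strip strip_alt
  cases iia with
  | none => rfl
  | some a =>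
    cases iib with
    | none => rfl
    | some b => simp [loops_agree]
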